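-- pv_equiv track=rewrite | github.com/YangdongONE/TF-LaC_2024 | metrics/eca_metrics.py | get_real_sub_emo_span
-- ===== SOURCE A (Python) =====
-- def get_real_sub_emo_span(labels):
--     spans = []
--     # start, end = 0,0
--     for i in range(len(labels)):
--         if labels[i]==1:
--             start = i
--             end = i
--             for j in range(i+1,len(labels)):
--                 if labels[j] == 2:
--                     end += 1
--                 else:
--                     spans.append([start,end])
--                     break
--     return spans
-- ===== SOURCE B (Python) =====
-- def get_real_sub_emo_span(labels):
--     # single pass: a 1 opens a pending span, 2s extend it, the first other
--     # label closes it at the previous index; an unclosed span is dropped.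
--     spans = []
--     start = None
--     for i in range(len(labels)):
--         x = labels[i]
--         if x != 2 and start is not None:
--             spans.append([start, i - 1])
--             start = None
--         if x == 1:
--             start = i
--     return spans
-- ===== Notes on version B (the rewrite author's own statement) =====
-- stated objective: simpler
-- what changed: replaced the nested loop (a forward rescan of 2s started at every 1) by a single state-machine pass keeping one pending span start that is closed at the first non-2 label
import Mathlib
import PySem

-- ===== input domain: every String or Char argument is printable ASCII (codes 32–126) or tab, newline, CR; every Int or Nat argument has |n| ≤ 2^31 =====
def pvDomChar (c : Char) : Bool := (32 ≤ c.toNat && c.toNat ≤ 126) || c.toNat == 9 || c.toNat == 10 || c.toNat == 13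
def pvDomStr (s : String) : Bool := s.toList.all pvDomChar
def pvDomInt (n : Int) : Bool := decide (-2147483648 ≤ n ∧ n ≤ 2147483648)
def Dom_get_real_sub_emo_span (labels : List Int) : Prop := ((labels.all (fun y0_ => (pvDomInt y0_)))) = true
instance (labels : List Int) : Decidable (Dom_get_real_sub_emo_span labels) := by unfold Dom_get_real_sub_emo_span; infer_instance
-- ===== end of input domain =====

-- B replaces A's nested rescan of 2-runs by a single state-machine pass (simpler); return values proved equal on all inputs.


-- ===== PORT A =====
-- inner 'for j in range(i+1, len(labels))' loop with break
def pvInnerA (labels : List Int) (j : Nat) (start e : Int) (spans : List (List Int)) : List (List Int) :=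
  if j < labels.length then
    if labels.getD j 0 = 2 then pvInnerA labels (j+1) start (e+1) spans
    else spans ++ [[start, e]]
  else spans
termination_by labels.length - j

-- outer 'for i in range(len(labels))' loop
def pvOuterA (labels : List Int) (i : Nat) (spans : List (List Int)) : List (List Int) :=
  if i < labels.length then
    pvOuterA labels (i+1)
      (if labels.getD i 0 = 1 then pvInnerA labels (i+1) (i : Int) (i : Int) spans else spans)
  else spans
termination_by labels.length - i

def get_real_sub_emo_span (labels : List Int) : List (List Int) :=
  pvOuterA labels 0 []

-- ===== PORT B =====
-- single pass with a pending span start (None = no open span)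
def pvAltLoop (labels : List Int) (i : Nat) (spans : List (List Int)) (start : Option Int) : List (List Int) :=
  if i < labels.length then
    let x := labels.getD i 0
    let p : List (List Int) × Option Int :=
      if x ≠ 2 then
        match start with
        | some s => (spans ++ [[s, (i : Int) - 1]], none)
        | none => (spans, none)
      else (spans, start)
    pvAltLoop labels (i+1) p.1 (if x = 1 then some (i : Int) else p.2)
  else spans
termination_by labels.length - i

def get_real_sub_emo_span_alt (labels : List Int) : List (List Int) :=
  pvAltLoop labels 0 [] none

-- ===== PRECONDITION & SPEC =====
def Spec_get_real_sub_emo_span (labels : List Int) (out : List (List Int)) : Prop := out = get_real_sub_emo_span_alt labels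
instance (labels : List Int) (out : List (List Int)) : Decidable (Spec_get_real_sub_emo_span labels out) := by unfold Spec_get_real_sub_emo_span; infer_instance

-- ===== CLAIM (what is proved, stated in full; the proofs are below) =====
def Claim_equal_get_real_sub_emo_span : Prop := ∀ (labels : List Int), Dom_get_real_sub_emo_span labels → Spec_get_real_sub_emo_span labels (get_real_sub_emo_span labels)

-- ===== LEMMAS AND PROOFS =====

-- unfolding lemmas for the three loops
theorem pvInnerA_pos (labels : List Int) {j : Nat} (h : j < labels.length)
    (start e : Int) (spans : List (List Int)) :
    pvInnerA labels j start e spans =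
      if labels.getD j 0 = 2 then pvInnerA labels (j+1) start (e+1) spans
      else spans ++ [[start, e]] := by
  rw [pvInnerA]; simp [h]

theorem pvInnerA_neg (labels : List Int) {j : Nat} (h : ¬ j < labels.length)
    (start e : Int) (spans : List (List Int)) :
    pvInnerA labels j start e spans = spans := by
  rw [pvInnerA]; simp [h]

theorem pvOuterA_pos (labels : List Int) {i : Nat} (h : i < labels.length)
    (spans : List (List Int)) :
    pvOuterA labels i spans =
      pvOuterA labels (i+1)
        (if labels.getD i 0 = 1 then pvInnerA labels (i+1) (i : Int) (i : Int) spans else spans) := by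
  rw [pvOuterA]; simp [h]

theorem pvOuterA_neg (labels : List Int) {i : Nat} (h : ¬ i < labels.length)
    (spans : List (List Int)) :
    pvOuterA labels i spans = spans := by
  rw [pvOuterA]; simp [h]

theorem pvAltLoop_pos_none (labels : List Int) {i : Nat} (h : i < labels.length)
    (spans : List (List Int)) :
    pvAltLoop labels i spans none =
      pvAltLoop labels (i+1) spans (if labels.getD i 0 = 1 then some (i : Int) else none) := by
  rw [pvAltLoop.eq_def]
  simp only [List.getD_eq_getElem?_getD] at *
  simp only [h, if_pos]
  split_ifs <;> rfl

theorem pvAltLoop_pos_some (labels : List Int) {i : Nat} (h : i < labels.length)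
    (spans : List (List Int)) (s : Int) :
    pvAltLoop labels i spans (some s) =
      if labels.getD i 0 = 2 then pvAltLoop labels (i+1) spans (some s)
      else pvAltLoop labels (i+1) (spans ++ [[s, (i : Int) - 1]])
             (if labels.getD i 0 = 1 then some (i : Int) else none) := by
  rw [pvAltLoop.eq_def]
  simp only [List.getD_eq_getElem?_getD] at *
  simp only [h, if_pos]
  by_cases h2 : (labels[i]?).getD 0 = 2
  · have h1 : ¬ (labels[i]?).getD 0 = 1 := by rw [h2]; decide
    simp [h2]
  · by_cases h1 : (labels[i]?).getD 0 = 1 <;> simp [h1, h2]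

theorem pvAltLoop_neg (labels : List Int) {i : Nat} (h : ¬ i < labels.length)
    (spans : List (List Int)) (start : Option Int) :
    pvAltLoop labels i spans start = spans := by
  rw [pvAltLoop.eq_def]; simp [h]

-- B's pending state 'some s' corresponds to A still being inside the inner scan
-- started at the 1 at index s, with current end i-1.
theorem pvKey (labels : List Int) : ∀ (n i : Nat), labels.length - i ≤ n →
    ∀ (spans : List (List Int)) (start : Option Int),
    pvAltLoop labels i spans start =
      pvOuterA labels i
        (match start with
         | none => spans
         | some s => pvInnerA labels i s ((i : Int) - 1) spans) := by
  intro n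
  induction n with
  | zero =>
    intro i hi spans start
    have hlen : ¬ i < labels.length := by omega
    cases start with
    | none => rw [pvAltLoop_neg labels hlen, pvOuterA_neg labels hlen]
    | some s =>
      show _ = pvOuterA labels i (pvInnerA labels i s ((i : Int) - 1) spans)
      rw [pvAltLoop_neg labels hlen, pvInnerA_neg labels hlen, pvOuterA_neg labels hlen]
  | succ n ih =>
    intro i hi spans start
    by_cases hlen : i < labels.length
    · have hrec : labels.length - (i+1) ≤ n := by omega
      have hc : ((i : Int) + 1) - 1 = (i : Int) := by ring
      cases start with
      | none =>
        rw [pvAltLoop_pos_none labels hlen, pvOuterA_pos labels hlen]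
        by_cases h1 : labels.getD i 0 = 1
        · rw [if_pos h1, if_pos h1, ih (i+1) hrec spans (some (i : Int))]
          simp only [Nat.cast_add, Nat.cast_one, hc]
        · rw [if_neg h1, if_neg h1, ih (i+1) hrec spans none]
      | some s =>
        show _ = pvOuterA labels i (pvInnerA labels i s ((i : Int) - 1) spans)
        rw [pvAltLoop_pos_some labels hlen, pvOuterA_pos labels hlen,
            pvInnerA_pos labels hlen]
        by_cases h2 : labels.getD i 0 = 2
        · have h1 : ¬ labels.getD i 0 = 1 := by rw [h2]; decide
          rw [if_pos h2, if_pos h2, if_neg h1, ih (i+1) hrec spans (some s)]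
          have hc2 : ((i : Int) + 1) - 1 = ((i : Int) - 1) + 1 := by ring
          simp only [Nat.cast_add, Nat.cast_one, hc2]
        · rw [if_neg h2, if_neg h2]
          by_cases h1 : labels.getD i 0 = 1
          · rw [if_pos h1, if_pos h1,
               ih (i+1) hrec (spans ++ [[s, (i : Int) - 1]]) (some (i : Int))]
            simp only [Nat.cast_add, Nat.cast_one, hc]
          · rw [if_neg h1, if_neg h1,
               ih (i+1) hrec (spans ++ [[s, (i : Int) - 1]]) none]
    · cases start with
      | none => rw [pvAltLoop_neg labels hlen, pvOuterA_neg labels hlen]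
      | some s =>
        show _ = pvOuterA labels i (pvInnerA labels i s ((i : Int) - 1) spans)
        rw [pvAltLoop_neg labels hlen, pvInnerA_neg labels hlen, pvOuterA_neg labels hlen]

-- ===== VERDICT (by name: the statement is the Claim_ definition above) =====
theorem get_real_sub_emo_span_spec : Claim_equal_get_real_sub_emo_span := by
  intro labels _
  unfold Spec_get_real_sub_emo_span get_real_sub_emo_span get_real_sub_emo_span_alt
  exact (pvKey labels labels.length 0 (by omega) [] none).symm
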